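-- pv_equiv track=rewrite | github.com/goracle/dirichlet-divisor-conjecture | gauss_circle_conjecture/b1prec.py | A_via_divisor_sum
-- ===== SOURCE A (Python) =====
-- def C(x):
--     if x <= 0:
--         return 0
--     return (x + 3) // 4 - (x + 1) // 4
--
-- def A_via_divisor_sum(N):
--     if N <= 0:
--         return 0
--     total = 0
--     d = 1
--     while d <= N:
--         t = N // d
--         d_hi = N // t
--         block_C = C(d_hi) - C(d - 1)
--         total += 4 * block_C * t
--         d = d_hi + 1
--     return total
-- ===== SOURCE B (Python) =====
-- def C(x):
--     if x <= 0:
--         return 0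
--     return (x + 3) // 4 - (x + 1) // 4
--
-- def A_via_divisor_sum(N):
--     if N <= 0:
--         return 0
--     k = 1
--     while (k + 1) * (k + 1) <= N:
--         k += 1
--     total = 0
--     for d in range(1, k + 1):
--         total += 4 * (C(d) - C(d - 1)) * (N // d)
--     for t in range(1, k + 1):
--         lo = max(N // (t + 1), k)
--         hi = N // t
--         if lo < hi:
--             total += 4 * (C(hi) - C(lo)) * t
--     return total
-- ===== Notes on version B (the rewrite author's own statement) =====
-- stated objective: alternative
-- what changed: Replaced A's single adaptive while-loop that jumps d straight to the end of each equal-quotient block by the classic symmetric hyperbola split: compute the integer square root K by a counting loop, then one term-per-d pass for the small divisors up to K plus one pass over the quotient values up to K, each contributing its clipped block via differences of the character partial-sum helper C.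
import Mathlib
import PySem

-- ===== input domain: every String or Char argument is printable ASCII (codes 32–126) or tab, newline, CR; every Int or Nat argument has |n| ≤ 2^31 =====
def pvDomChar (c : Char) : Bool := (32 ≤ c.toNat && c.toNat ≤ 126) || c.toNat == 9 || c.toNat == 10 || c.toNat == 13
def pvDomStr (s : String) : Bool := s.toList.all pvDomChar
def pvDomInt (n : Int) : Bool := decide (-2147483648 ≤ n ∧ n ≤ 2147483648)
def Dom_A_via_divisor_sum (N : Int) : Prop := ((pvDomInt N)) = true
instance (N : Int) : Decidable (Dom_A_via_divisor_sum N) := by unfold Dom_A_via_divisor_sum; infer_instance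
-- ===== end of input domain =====

-- B replaces A's adaptive block-jumping while-loop by the symmetric hyperbola split (isqrt + two fixed passes); objective: alternative.

-- ===== PORT A =====
-- helper C of the Python module (shared by A and B, as in the Python sources)
def pyC (x : Int) : Int :=
  if x ≤ 0 then 0
  else PySem.Int.floordiv (x + 3) 4 - PySem.Int.floordiv (x + 1) 4

-- the while loop of A, fuel-counted (the fuel is a totality guard only; N.toNat steps suffice)
def pvLoopA (N : Int) : Nat → Int → Int → Int
  | 0, _, total => total
  | fuel + 1, d, total =>
    if d ≤ N then
      let t := PySem.Int.floordiv N d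
      let d_hi := PySem.Int.floordiv N t
      let block_C := pyC d_hi - pyC (d - 1)
      pvLoopA N fuel (d_hi + 1) (total + 4 * block_C * t)
    else total

def A_via_divisor_sum (N : Int) : Int :=
  if N ≤ 0 then 0
  else pvLoopA N N.toNat 1 0

-- ===== PORT B =====
-- B's isqrt while-loop 'while (k+1)*(k+1) <= N: k += 1', fuel-counted (fuel is a totality guard only)
def pvIsqrtLoop (N : Int) : Nat → Int → Int
  | 0, k => k
  | fuel + 1, k => if (k + 1) * (k + 1) ≤ N then pvIsqrtLoop N fuel (k + 1) else k

def A_via_divisor_sum_alt (N : Int) : Int :=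
  if N ≤ 0 then 0
  else
    let k := pvIsqrtLoop N N.toNat 1
    let total1 := (PySem.List.pyRange 1 (k + 1) 1).foldl
      (fun total d => total + 4 * (pyC d - pyC (d - 1)) * PySem.Int.floordiv N d) 0
    (PySem.List.pyRange 1 (k + 1) 1).foldl
      (fun total t =>
        let lo := max (PySem.Int.floordiv N (t + 1)) k
        let hi := PySem.Int.floordiv N t
        if lo < hi then total + 4 * (pyC hi - pyC lo) * t else total) total1

-- ===== PRECONDITION & SPEC =====
def Spec_A_via_divisor_sum (N : Int) (out : Int) : Prop := out = A_via_divisor_sum_alt N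
instance (N : Int) (out : Int) : Decidable (Spec_A_via_divisor_sum N out) := by unfold Spec_A_via_divisor_sum; infer_instance

-- ===== CLAIM (what is proved, stated in full; the proofs are below) =====
def Claim_equal_A_via_divisor_sum : Prop := ∀ (N : Int), Dom_A_via_divisor_sum N → Spec_A_via_divisor_sum N (A_via_divisor_sum N)

-- ===== LEMMAS AND PROOFS =====

-- the flat tail sum  Σ_{x=d}^{N} 4·(C(x)−C(x−1))·(N//x)
def pvS (N d : Int) : Int :=
  if h : d ≤ N then
    4 * (pyC d - pyC (d - 1)) * PySem.Int.floordiv N d + pvS N (d + 1)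
  else 0
termination_by (N + 1 - d).toNat
decreasing_by omega

theorem pvS_of_gt {N d : Int} (h : ¬ d ≤ N) : pvS N d = 0 := by
  rw [pvS]; simp [h]

theorem pvS_of_le {N d : Int} (h : d ≤ N) :
    pvS N d = 4 * (pyC d - pyC (d - 1)) * PySem.Int.floordiv N d + pvS N (d + 1) := by
  rw [pvS]; simp [h]

-- fdiv is antitone in a positive divisor (for N ≥ 0)
theorem pv_fdiv_le_of_le {N a b : Int} (hN : 0 ≤ N) (ha : 0 < a) (hab : a ≤ b) :
    PySem.Int.floordiv N b ≤ PySem.Int.floordiv N a := by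
  have hb : 0 < b := lt_of_lt_of_le ha hab
  rw [PySem.Int.le_floordiv_iff_mul_le ha]
  have h1 : PySem.Int.floordiv N b * b ≤ N :=
    (PySem.Int.le_floordiv_iff_mul_le hb (q := PySem.Int.floordiv N b) (a := N)).mp le_rfl
  have hq : 0 ≤ PySem.Int.floordiv N b := by
    rw [PySem.Int.le_floordiv_iff_mul_le hb]; simpa using hN
  nlinarith

theorem pv_fdiv_le_self {N t : Int} (hN : 0 ≤ N) (ht : 1 ≤ t) :
    PySem.Int.floordiv N t ≤ N := by
  calc PySem.Int.floordiv N t ≤ PySem.Int.floordiv N 1 := pv_fdiv_le_of_le hN one_pos ht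
  _ = N := by simp [PySem.Int.floordiv]

-- every x with N//(t+1) < x ≤ N//t has quotient exactly t
theorem pv_quot_const {N t x : Int} (ht : 0 < t) (hx0 : 0 < x)
    (hx1 : PySem.Int.floordiv N (t + 1) < x) (hx2 : x ≤ PySem.Int.floordiv N t) :
    PySem.Int.floordiv N x = t := by
  apply le_antisymm
  · have h1 : N < x * (t + 1) :=
      (PySem.Int.floordiv_lt_iff_lt_mul (by omega : (0:Int) < t + 1) (q := x) (a := N)).mp hx1
    have h2 : PySem.Int.floordiv N x < t + 1 :=
      (PySem.Int.floordiv_lt_iff_lt_mul hx0 (q := t + 1) (a := N)).mpr (by linarith [mul_comm x (t+1)])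
    omega
  · rw [PySem.Int.le_floordiv_iff_mul_le hx0]
    have := (PySem.Int.le_floordiv_iff_mul_le ht (q := x) (a := N)).mp hx2
    linarith

-- all x in A's block [d, N//(N//d)] share the quotient t = N//d
theorem pv_block_const {N d x : Int} (hd : 1 ≤ d) (hdN : d ≤ N)
    (hx1 : d ≤ x) (hx2 : x ≤ PySem.Int.floordiv N (PySem.Int.floordiv N d)) :
    PySem.Int.floordiv N x = PySem.Int.floordiv N d := by
  have hd0 : (0:Int) < d := hd
  have hx0 : (0:Int) < x := lt_of_lt_of_le hd0 hx1
  have ht : 1 ≤ PySem.Int.floordiv N d := by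
    rw [PySem.Int.le_floordiv_iff_mul_le hd0]; omega
  set t := PySem.Int.floordiv N d with htdef
  apply pv_quot_const ht hx0 ?_ hx2
  have hNlt : N < (t + 1) * d :=
    (PySem.Int.floordiv_lt_iff_lt_mul hd0 (q := t + 1) (a := N)).mp (by omega)
  have : N < x * (t + 1) := by nlinarith
  have := (PySem.Int.floordiv_lt_iff_lt_mul (by omega : (0:Int) < t + 1) (q := x) (a := N)).mpr this
  omega

-- telescoping a constant-quotient stretch of the flat sum
theorem pv_telescope (N t : Int) :
    ∀ (k : Nat) (d e : Int), 1 ≤ d → d ≤ e → e ≤ N →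
    (e + 1 - d).toNat = k →
    (∀ x, d ≤ x → x ≤ e → PySem.Int.floordiv N x = t) →
    pvS N d = 4 * (pyC e - pyC (d - 1)) * t + pvS N (e + 1) := by
  intro k
  induction k with
  | zero => intro d e h1 h2 _ hk _; omega
  | succ k ih =>
    intro d e h1 h2 h3 hk hconst
    rcases eq_or_lt_of_le h2 with rfl | hlt
    · rw [pvS_of_le h3, hconst d le_rfl le_rfl]
    · have hdN : d ≤ N := le_trans h2 h3
      rw [pvS_of_le hdN, hconst d le_rfl h2,
        ih (d + 1) e (by omega) (by omega) h3 (by omega)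
          (fun x hx1 hx2 => hconst x (by omega) hx2)]
      ring

-- A's loop computes the flat tail sum
theorem pvLoopA_eq_pvS (N : Int) (hN : 0 < N) :
    ∀ (fuel : Nat) (d total : Int), 1 ≤ d → (N + 1 - d).toNat ≤ fuel →
    pvLoopA N fuel d total = total + pvS N d := by
  intro fuel
  induction fuel with
  | zero =>
    intro d total h1 hf
    have : ¬ d ≤ N := by omega
    simp [pvLoopA, pvS_of_gt this]
  | succ fuel ih =>
    intro d total h1 hf
    by_cases hdN : d ≤ N
    · have hd0 : (0:Int) < d := h1
      have ht : 1 ≤ PySem.Int.floordiv N d := by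
        rw [PySem.Int.le_floordiv_iff_mul_le hd0]; omega
      set t := PySem.Int.floordiv N d with htdef
      set e := PySem.Int.floordiv N t with hedef
      have he1 : d ≤ e := by
        rw [hedef, PySem.Int.le_floordiv_iff_mul_le ht]
        have := (PySem.Int.le_floordiv_iff_mul_le hd0 (q := t) (a := N)).mp le_rfl
        linarith
      have he2 : e ≤ N := pv_fdiv_le_self (by omega) ht
      have hconst : ∀ x, d ≤ x → x ≤ e → PySem.Int.floordiv N x = t :=
        fun x hx1 hx2 => pv_block_const h1 hdN hx1 hx2
      rw [pvLoopA]
      simp only [hdN, if_pos, ← htdef, ← hedef]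
      rw [ih (e + 1) _ (by omega) (by omega),
        pv_telescope N t (e + 1 - d).toNat d e h1 he1 he2 rfl hconst]
      ring
    · rw [pvLoopA]
      simp [hdN, pvS_of_gt hdN]

-- B's isqrt loop returns the integer square root (for 0 < N)
theorem pvIsqrtLoop_spec (N : Int) :
    ∀ (fuel : Nat) (k : Int), 1 ≤ k → k * k ≤ N → (N - k).toNat ≤ fuel →
    1 ≤ pvIsqrtLoop N fuel k ∧ pvIsqrtLoop N fuel k * pvIsqrtLoop N fuel k ≤ N ∧
      N < (pvIsqrtLoop N fuel k + 1) * (pvIsqrtLoop N fuel k + 1) := by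
  intro fuel
  induction fuel with
  | zero =>
    intro k h1 h2 hf
    have hNk : N ≤ k := by omega
    have hk1 : k = 1 := by nlinarith
    have hN1 : N = 1 := by nlinarith
    simp [pvIsqrtLoop, hk1, hN1]
  | succ fuel ih =>
    intro k h1 h2 hf
    rw [pvIsqrtLoop]
    by_cases h : (k + 1) * (k + 1) ≤ N
    · simp only [h, if_pos]
      exact ih (k + 1) (by omega) h (by omega)
    · simp only [h, if_neg, not_false_iff]
      exact ⟨h1, h2, by omega⟩

-- B's first fold: term-per-d flat sum for d in [d, k]
theorem pvFoldSmall_eq (N k : Int) (hkN : k ≤ N) :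
    ∀ (j : Nat) (d total : Int), 1 ≤ d → d ≤ k + 1 → (k + 1 - d).toNat = j →
    (PySem.List.pyRange d (k + 1) 1).foldl
      (fun total d => total + 4 * (pyC d - pyC (d - 1)) * PySem.Int.floordiv N d) total
      = total + (pvS N d - pvS N (k + 1)) := by
  intro j
  induction j with
  | zero =>
    intro d total h1 h2 hj
    have hd : d = k + 1 := by omega
    rw [hd, PySem.List.pyRange_one_eq_nil (by omega)]
    simp
  | succ j ih =>
    intro d total h1 h2 hj
    have hd : d ≤ N := by omega
    rw [PySem.List.pyRange_one_cons (by omega : d < k + 1)]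
    simp only [List.foldl_cons]
    rw [ih (d + 1) _ (by omega) (by omega) (by omega), pvS_of_le hd]
    ring

-- B's second fold: clipped quotient-value blocks cover exactly the tail (k, N]
theorem pvFoldBig_eq (N k : Int) (hk1 : 1 ≤ k) (hk2 : k * k ≤ N)
    (hk3 : N < (k + 1) * (k + 1)) :
    ∀ (j : Nat) (t total : Int), 1 ≤ t → t ≤ k + 1 → (k + 1 - t).toNat = j →
    (PySem.List.pyRange t (k + 1) 1).foldl
      (fun total t =>
        if max (PySem.Int.floordiv N (t + 1)) k < PySem.Int.floordiv N t then
          total + 4 * (pyC (PySem.Int.floordiv N t) - pyC (max (PySem.Int.floordiv N (t + 1)) k)) * t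
        else total) total
      = total + (pvS N (k + 1) - pvS N (max (PySem.Int.floordiv N t) k + 1)) := by
  intro j
  induction j with
  | zero =>
    intro t total h1 h2 hj
    have ht : t = k + 1 := by omega
    have hdiv : PySem.Int.floordiv N (k + 1) ≤ k := by
      have := (PySem.Int.floordiv_lt_iff_lt_mul (by omega : (0:Int) < k + 1)
        (q := k + 1) (a := N)).mpr hk3
      omega
    rw [ht, PySem.List.pyRange_one_eq_nil (by omega)]
    simp [max_eq_right hdiv]
  | succ j ih =>
    intro t total h1 h2 hj
    have hN : (0:Int) < N := by nlinarith
    have ht0 : (0:Int) < t := h1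
    rw [PySem.List.pyRange_one_cons (by omega : t < k + 1)]
    simp only [List.foldl_cons]
    have hmono : PySem.Int.floordiv N (t + 1) ≤ PySem.Int.floordiv N t :=
      pv_fdiv_le_of_le (by omega) ht0 (by omega)
    set lo := max (PySem.Int.floordiv N (t + 1)) k with hlo
    set hi := PySem.Int.floordiv N t with hhi
    have hlo1 : PySem.Int.floordiv N (t + 1) ≤ lo := le_max_left _ _
    have hlok : k ≤ lo := le_max_right _ _
    by_cases hcase : lo < hi
    · rw [if_pos hcase, ih (t + 1) _ (by omega) (by omega) (by omega), ← hlo,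
        max_eq_left (show k ≤ hi by omega)]
      have htel : pvS N (lo + 1) = 4 * (pyC hi - pyC lo) * t + pvS N (hi + 1) := by
        have hx := pv_telescope N t (hi + 1 - (lo + 1)).toNat (lo + 1) hi
          (by omega) (by omega) (hhi ▸ pv_fdiv_le_self (by omega) h1) rfl
          (fun x hx1 hx2 => pv_quot_const ht0 (by omega) (by omega) (hhi ▸ hx2))
        simpa using hx
      linarith [htel]
    · rw [if_neg hcase, ih (t + 1) _ (by omega) (by omega) (by omega), ← hlo]
      have hmax : max hi k = lo := by
        rcases le_total (PySem.Int.floordiv N (t + 1)) k with hc | hc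
        · have hek : lo = k := by rw [hlo]; exact max_eq_right hc
          rw [hek]; exact max_eq_right (show hi ≤ k by omega)
        · have hel : lo = PySem.Int.floordiv N (t + 1) := by rw [hlo]; exact max_eq_left hc
          have hhl : hi = lo := le_antisymm (by omega) (by omega)
          rw [hhl]; exact max_eq_left (show k ≤ lo by omega)
      rw [hmax]

-- ===== VERDICT (by name: the statement is the Claim_ definition above) =====
theorem A_via_divisor_sum_spec : Claim_equal_A_via_divisor_sum := by
  intro N _
  unfold Spec_A_via_divisor_sum A_via_divisor_sum A_via_divisor_sum_alt
  by_cases h : N ≤ 0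
  · simp [h]
  · simp only [h, if_false]
    have hN : (0:Int) < N := by omega
    obtain ⟨hk1, hk2, hk3⟩ := pvIsqrtLoop_spec N N.toNat 1 le_rfl (by nlinarith) (by omega)
    set k := pvIsqrtLoop N N.toNat 1 with hkdef
    have hkN : k ≤ N := by nlinarith
    rw [pvLoopA_eq_pvS N hN N.toNat 1 0 le_rfl (by omega),
      pvFoldSmall_eq N k hkN (k + 1 - 1).toNat 1 0 le_rfl (by omega) rfl,
      pvFoldBig_eq N k hk1 hk2 hk3 (k + 1 - 1).toNat 1 (0 + (pvS N 1 - pvS N (k + 1))) le_rfl (by omega) rfl]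
    have h1 : PySem.Int.floordiv N 1 = N := by simp [PySem.Int.floordiv]
    rw [h1, max_eq_left hkN, pvS_of_gt (by omega : ¬ N + 1 ≤ N)]
    ring
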